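-- pv_equiv track=rewrite | github.com/FahrulMaulana/DistriBERT-FastApi | models/distilbert_handler.py | _create_natural_response
-- ===== SOURCE A (Python) =====
-- def _create_natural_response(question: str, answer: str, intent: str) -> str:
--     """Create natural language response from QA result"""
--     question_lower = question.lower()
--
--     # Response templates based on question type
--     if any(word in question_lower for word in ['kapan', 'when', 'jam', 'waktu']):
--         return f"Untuk informasi waktu: {answer}. Silakan cek jadwal terbaru di portal akademik."
--
--     elif any(word in question_lower for word in ['dimana', 'where', 'lokasi', 'tempat']):
--         return f"Lokasi: {answer}. Untuk petunjuk lengkap, hubungi bagian informasi."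
--
--     elif any(word in question_lower for word in ['bagaimana', 'how', 'cara']):
--         return f"Cara: {answer}. Jika memerlukan bantuan lebih lanjut, silakan hubungi admin."
--
--     elif any(word in question_lower for word in ['berapa', 'how much', 'biaya']):
--         return f"Informasi biaya: {answer}. Hubungi bagian keuangan untuk detail lengkap."
--
--     else:
--         # Generic response
--         return f"{answer}. Untuk informasi lebih lengkap, silakan hubungi bagian terkait."
-- ===== SOURCE B (Python) =====
-- _KEYWORD_GROUP = {
--     'kapan': 0, 'when': 0, 'jam': 0, 'waktu': 0,
--     'dimana': 1, 'where': 1, 'lokasi': 1, 'tempat': 1,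
--     'bagaimana': 2, 'how': 2, 'cara': 2,
--     'berapa': 3, 'how much': 3, 'biaya': 3,
-- }
--
-- _RESPONSES = [
--     "Untuk informasi waktu: {answer}. Silakan cek jadwal terbaru di portal akademik.",
--     "Lokasi: {answer}. Untuk petunjuk lengkap, hubungi bagian informasi.",
--     "Cara: {answer}. Jika memerlukan bantuan lebih lanjut, silakan hubungi admin.",
--     "Informasi biaya: {answer}. Hubungi bagian keuangan untuk detail lengkap.",
--     "{answer}. Untuk informasi lebih lengkap, silakan hubungi bagian terkait.",
-- ]
--
-- def _create_natural_response(question: str, answer: str, intent: str) -> str: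
--     # Exhaustive scan: collect the group of every matching keyword and take the
--     # smallest group number (generic response 4 if nothing matches).  This is
--     # equivalent to the first-match chain because group numbers follow branch
--     # order ('how much' also contains 'how', so group 2 wins there as in A).
--     question_lower = question.lower()
--     idx = min((g for kw, g in _KEYWORD_GROUP.items() if kw in question_lower),
--               default=len(_RESPONSES) - 1)
--     return _RESPONSES[idx].format(answer=answer)
-- ===== Notes on version B (the rewrite author's own statement) =====
-- stated objective: alternative
-- what changed: Replaced the ordered short-circuit if/elif chain by an exhaustive scan over a flat keyword->group dict that takes the MINIMUM matched group number (default = generic), then indexes a response table; correct because group numbers follow branch order and 'how much' contains 'how'.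
import Mathlib
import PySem

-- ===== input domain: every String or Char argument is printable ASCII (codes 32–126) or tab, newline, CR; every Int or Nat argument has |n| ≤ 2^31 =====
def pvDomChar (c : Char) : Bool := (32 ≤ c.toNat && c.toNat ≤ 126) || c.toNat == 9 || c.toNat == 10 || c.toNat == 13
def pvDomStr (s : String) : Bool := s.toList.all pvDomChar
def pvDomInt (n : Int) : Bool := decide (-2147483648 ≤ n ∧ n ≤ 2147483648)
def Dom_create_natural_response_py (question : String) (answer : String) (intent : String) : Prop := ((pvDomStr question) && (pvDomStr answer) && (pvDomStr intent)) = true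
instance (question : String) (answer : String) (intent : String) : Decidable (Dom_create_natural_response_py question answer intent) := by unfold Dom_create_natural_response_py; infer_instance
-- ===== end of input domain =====

-- B replaces A's if/elif first-match chain by min-over-all-matched-keyword-groups + table lookup (alternative algorithm, same cost).


-- ===== PORT A =====
def create_natural_response_py (question : String) (answer : String) (intent : String) : String :=
  let question_lower := PySem.Str.lower question
  if ["kapan", "when", "jam", "waktu"].any (fun w => PySem.Str.isIn w question_lower) then
    "Untuk informasi waktu: " ++ answer ++ ". Silakan cek jadwal terbaru di portal akademik."
  else if ["dimana", "where", "lokasi", "tempat"].any (fun w => PySem.Str.isIn w question_lower) then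
    "Lokasi: " ++ answer ++ ". Untuk petunjuk lengkap, hubungi bagian informasi."
  else if ["bagaimana", "how", "cara"].any (fun w => PySem.Str.isIn w question_lower) then
    "Cara: " ++ answer ++ ". Jika memerlukan bantuan lebih lanjut, silakan hubungi admin."
  else if ["berapa", "how much", "biaya"].any (fun w => PySem.Str.isIn w question_lower) then
    "Informasi biaya: " ++ answer ++ ". Hubungi bagian keuangan untuk detail lengkap."
  else
    answer ++ ". Untuk informasi lebih lengkap, silakan hubungi bagian terkait."

-- ===== PORT B =====
-- Source B's _KEYWORD_GROUP dict as an association list (insertion order)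
def pvKeywordGroup : List (String × Nat) :=
  [("kapan", 0), ("when", 0), ("jam", 0), ("waktu", 0),
   ("dimana", 1), ("where", 1), ("lokasi", 1), ("tempat", 1),
   ("bagaimana", 2), ("how", 2), ("cara", 2),
   ("berapa", 3), ("how much", 3), ("biaya", 3)]

-- Source B's _RESPONSES table; a template "pre{answer}suf" is the pair (pre, suf)
def pvResponses : List (String × String) :=
  [("Untuk informasi waktu: ", ". Silakan cek jadwal terbaru di portal akademik."),
   ("Lokasi: ", ". Untuk petunjuk lengkap, hubungi bagian informasi."),
   ("Cara: ", ". Jika memerlukan bantuan lebih lanjut, silakan hubungi admin."),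
   ("Informasi biaya: ", ". Hubungi bagian keuangan untuk detail lengkap."),
   ("", ". Untuk informasi lebih lengkap, silakan hubungi bagian terkait.")]

-- min over the groups of the matching keywords, default 4 (= len(_RESPONSES)-1)
def create_natural_response_py_alt (question : String) (answer : String) (intent : String) : String :=
  let question_lower := PySem.Str.lower question
  let idx := pvKeywordGroup.foldl
      (fun m p => if PySem.Str.isIn p.1 question_lower then min m p.2 else m) 4
  let t := pvResponses.getD idx ("", "")
  t.1 ++ answer ++ t.2

-- ===== PRECONDITION & SPEC =====
def Spec_create_natural_response_py (question : String) (answer : String) (intent : String) (out : String) : Prop := out = create_natural_response_py_alt question answer intent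
instance (question : String) (answer : String) (intent : String) (out : String) : Decidable (Spec_create_natural_response_py question answer intent out) := by unfold Spec_create_natural_response_py; infer_instance

-- ===== CLAIM (what is proved, stated in full; the proofs are below) =====
def Claim_equal_create_natural_response_py : Prop := ∀ (question : String) (answer : String) (intent : String), Dom_create_natural_response_py question answer intent → Spec_create_natural_response_py question answer intent (create_natural_response_py question answer intent)

-- ===== LEMMAS AND PROOFS =====
-- per-group reductions of B's min-fold: folding one keyword group over accumulator m
-- yields `if (any keyword of the group matches) then min m g else m`
theorem pvFoldG0 (ql : String) (m : Nat) :
    List.foldl (fun m p => if PySem.Str.isIn p.1 ql then min m p.2 else m) m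
      [("kapan", 0), ("when", 0), ("jam", 0), ("waktu", 0)]
    = if ["kapan", "when", "jam", "waktu"].any (fun w => PySem.Str.isIn w ql) then min m 0 else m := by
  simp only [List.foldl, List.any]
  split_ifs <;> simp_all

theorem pvFoldG1 (ql : String) (m : Nat) :
    List.foldl (fun m p => if PySem.Str.isIn p.1 ql then min m p.2 else m) m
      [("dimana", 1), ("where", 1), ("lokasi", 1), ("tempat", 1)]
    = if ["dimana", "where", "lokasi", "tempat"].any (fun w => PySem.Str.isIn w ql) then min m 1 else m := by
  simp only [List.foldl, List.any]
  split_ifs <;> simp_all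

theorem pvFoldG2 (ql : String) (m : Nat) :
    List.foldl (fun m p => if PySem.Str.isIn p.1 ql then min m p.2 else m) m
      [("bagaimana", 2), ("how", 2), ("cara", 2)]
    = if ["bagaimana", "how", "cara"].any (fun w => PySem.Str.isIn w ql) then min m 2 else m := by
  simp only [List.foldl, List.any]
  split_ifs <;> simp_all

theorem pvFoldG3 (ql : String) (m : Nat) :
    List.foldl (fun m p => if PySem.Str.isIn p.1 ql then min m p.2 else m) m
      [("berapa", 3), ("how much", 3), ("biaya", 3)]
    = if ["berapa", "how much", "biaya"].any (fun w => PySem.Str.isIn w ql) then min m 3 else m := by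
  simp only [List.foldl, List.any]
  split_ifs <;> simp_all

-- ===== VERDICT (by name: the statement is the Claim_ definition above) =====
theorem create_natural_response_py_spec : Claim_equal_create_natural_response_py := by
  intro question answer intent _
  unfold Spec_create_natural_response_py create_natural_response_py create_natural_response_py_alt
  have hsplit : pvKeywordGroup =
      ([("kapan", 0), ("when", 0), ("jam", 0), ("waktu", 0)] ++
        ([("dimana", 1), ("where", 1), ("lokasi", 1), ("tempat", 1)] ++
          ([("bagaimana", 2), ("how", 2), ("cara", 2)] ++
            [("berapa", 3), ("how much", 3), ("biaya", 3)]))) := rfl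
  simp only [hsplit, List.foldl_append, pvFoldG0, pvFoldG1, pvFoldG2, pvFoldG3]
  set ql := PySem.Str.lower question
  cases hb0 : (["kapan", "when", "jam", "waktu"].any (fun w => PySem.Str.isIn w ql)) <;>
  cases hb1 : (["dimana", "where", "lokasi", "tempat"].any (fun w => PySem.Str.isIn w ql)) <;>
  cases hb2 : (["bagaimana", "how", "cara"].any (fun w => PySem.Str.isIn w ql)) <;>
  cases hb3 : (["berapa", "how much", "biaya"].any (fun w => PySem.Str.isIn w ql)) <;>
  simp [pvResponses]
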